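-- pv_equiv track=rewrite | github.com/cdgtlmda/HavenHealthPassport | src/translation/production/cultural_adaptation_service.py | _contains_phi
-- ===== SOURCE A (Python) =====
-- def _contains_phi(content: str) -> bool:
--     """Check if content contains PHI that needs encryption."""
--     phi_indicators = [
--         "patient",
--         "medical",
--         "health",
--         "diagnosis",
--         "treatment",
--         "medication",
--         "condition",
--         "symptom",
--     ]
--     content_lower = content.lower()
--     return any(indicator in content_lower for indicator in phi_indicators)
-- ===== SOURCE B (Python) =====
-- _PHI_KEYWORDS = (
--     "patient", "medical", "health", "diagnosis",
--     "treatment", "medication", "condition", "symptom",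
-- )
--
-- def _contains_phi(content: str) -> bool:
--     """Check if content contains PHI that needs encryption.
--
--     Single left-to-right pass simulating all partial keyword matches at
--     once (NFA-style multi-pattern matcher): `active` holds the remaining
--     suffix of every keyword currently being matched.
--     """
--     active = []
--     for ch in content.lower():
--         nxt = []
--         for rest in active:
--             if rest[0] == ch:
--                 if len(rest) == 1:
--                     return True
--                 nxt.append(rest[1:])
--         for kw in _PHI_KEYWORDS:
--             if kw[0] == ch:
--                 nxt.append(kw[1:])
--         active = nxt
--     return False
-- ===== Notes on version B (the rewrite author's own statement) =====
-- stated objective: alternative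
-- what changed: Replaces eight independent substring scans with a single left-to-right pass that simulates all partial keyword matches simultaneously (NFA-style multi-pattern matching with a set of live suffixes), returning on the first completed match.
import Mathlib
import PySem

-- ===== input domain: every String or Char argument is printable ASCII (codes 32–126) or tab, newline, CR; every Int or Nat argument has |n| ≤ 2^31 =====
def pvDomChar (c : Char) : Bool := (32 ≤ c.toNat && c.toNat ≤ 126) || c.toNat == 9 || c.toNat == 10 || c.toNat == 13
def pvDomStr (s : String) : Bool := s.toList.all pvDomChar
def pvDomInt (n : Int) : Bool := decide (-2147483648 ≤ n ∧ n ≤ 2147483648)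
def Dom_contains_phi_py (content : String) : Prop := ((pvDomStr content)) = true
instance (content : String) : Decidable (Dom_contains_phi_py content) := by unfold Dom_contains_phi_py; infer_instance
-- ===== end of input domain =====

-- B replaces A's eight independent substring scans with one single-pass
-- multi-pattern matcher maintaining the set of live partial matches
-- (alternative algorithm; same result).


-- ===== PORT A =====
-- A: lowercase once, then `any(indicator in content_lower for indicator in phi_indicators)`.
def contains_phi_py (content : String) : Bool :=
  let phi_indicators : List String :=
    ["patient", "medical", "health", "diagnosis",
     "treatment", "medication", "condition", "symptom"]
  let content_lower := PySem.Str.lower content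
  phi_indicators.any (fun indicator => PySem.Str.isIn indicator content_lower)

-- ===== PORT B =====
def phiKeywords : List (List Char) :=
  ["patient", "medical", "health", "diagnosis",
   "treatment", "medication", "condition", "symptom"].map String.toList

-- one step over the text: complete a live match (True), else advance the live
-- suffixes and start new ones at keywords whose first char is `c`
def phiRun (kws : List (List Char)) (active : List (List Char)) : List Char → Bool
  | [] => false
  | c :: t =>
    if active.any (fun r => r = [c]) then true
    else
      phiRun kws
        ((active.filter (fun r => r.head? = some c)).map List.tail
          ++ (kws.filter (fun k => k.head? = some c)).map List.tail) t

def contains_phi_py_alt (content : String) : Bool :=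
  phiRun phiKeywords [] (PySem.Str.lower content).toList

-- ===== PRECONDITION & SPEC =====
def Spec_contains_phi_py (content : String) (out : Bool) : Prop := out = contains_phi_py_alt content
instance (content : String) (out : Bool) : Decidable (Spec_contains_phi_py content out) := by unfold Spec_contains_phi_py; infer_instance

-- ===== CLAIM =====
def Claim_equal_contains_phi_py : Prop := ∀ (content : String), Dom_contains_phi_py content → Spec_contains_phi_py content (contains_phi_py content)

-- ===== LEMMAS AND PROOFS =====

-- invariant: the simulation is true iff some live suffix is a prefix of the
-- remaining text, or some keyword occurs anywhere in it
theorem phiRun_iff (kws : List (List Char)) (hk : ∀ k ∈ kws, 2 ≤ k.length)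
    (t : List Char) :
    ∀ active : List (List Char), (∀ r ∈ active, r ≠ []) →
      (phiRun kws active t = true ↔
        (∃ r ∈ active, r <+: t) ∨ (∃ k ∈ kws, k <:+: t)) := by
  induction t with
  | nil =>
      intro active ha
      simp only [phiRun, Bool.false_eq_true, false_iff]
      push Not
      refine ⟨fun r hr hp => ha r hr (List.prefix_nil.mp hp), fun k hkk hi => ?_⟩
      have h2 := hk k hkk
      rw [List.eq_nil_of_infix_nil hi] at h2
      simp at h2
  | cons c t ih =>
      intro active ha
      by_cases hdone : active.any (fun r => r = [c]) = true
      · simp only [phiRun, hdone, if_true, true_iff]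
        obtain ⟨r, hr, hrc⟩ := List.any_eq_true.mp hdone
        exact Or.inl ⟨r, hr, by simp_all⟩
      · simp only [phiRun, hdone, Bool.false_eq_true, if_false]
        rw [ih]
        · constructor
          · rintro (⟨r, hr, hp⟩ | ⟨k, hkk, hi⟩)
            · simp only [List.mem_append, List.mem_map, List.mem_filter] at hr
              rcases hr with ⟨s, ⟨hs, hh⟩, rfl⟩ | ⟨s, ⟨hs, hh⟩, rfl⟩
              · cases s with
                | nil => simp at hh
                | cons x xs =>
                    simp only [List.head?_cons, Option.some.injEq, decide_eq_true_eq] at hh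
                    subst hh
                    exact Or.inl ⟨x :: xs, hs, List.cons_prefix_cons.mpr ⟨rfl, hp⟩⟩
              · cases s with
                | nil => simp at hh
                | cons x xs =>
                    simp only [List.head?_cons, Option.some.injEq, decide_eq_true_eq] at hh
                    subst hh
                    exact Or.inr ⟨x :: xs, hs,
                      List.infix_cons_iff.mpr (Or.inl (List.cons_prefix_cons.mpr ⟨rfl, hp⟩))⟩
            · exact Or.inr ⟨k, hkk, List.infix_cons_iff.mpr (Or.inr hi)⟩
          · rintro (⟨r, hr, hp⟩ | ⟨k, hkk, hi⟩)
            · cases r with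
              | nil => exact absurd rfl (ha _ hr)
              | cons x xs =>
                  obtain ⟨hx, hxp⟩ := List.cons_prefix_cons.mp hp
                  subst hx
                  cases xs with
                  | nil => exact absurd (List.any_eq_true.mpr ⟨_, hr, by simp⟩) hdone
                  | cons y ys =>
                      refine Or.inl ⟨y :: ys, ?_, hxp⟩
                      simp only [List.mem_append, List.mem_map, List.mem_filter]
                      exact Or.inl ⟨x :: y :: ys, ⟨hr, by simp⟩, rfl⟩
            · rcases List.infix_cons_iff.mp hi with hp | hi'
              · cases k with
                | nil => simpa using hk [] hkk
                | cons x xs =>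
                    obtain ⟨hx, hxp⟩ := List.cons_prefix_cons.mp hp
                    subst hx
                    refine Or.inl ⟨xs, ?_, hxp⟩
                    simp only [List.mem_append, List.mem_map, List.mem_filter]
                    exact Or.inr ⟨x :: xs, ⟨hkk, by simp⟩, rfl⟩
              · exact Or.inr ⟨k, hkk, hi'⟩
        · intro r hr
          simp only [List.mem_append, List.mem_map, List.mem_filter] at hr
          rcases hr with ⟨s, ⟨hs, hh⟩, rfl⟩ | ⟨s, ⟨hs, hh⟩, rfl⟩
          · cases s with
            | nil => simp at hh
            | cons x xs =>
                simp only [List.head?_cons, Option.some.injEq, decide_eq_true_eq] at hh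
                subst hh
                intro h
                simp only [List.tail_cons] at h
                subst h
                exact hdone (List.any_eq_true.mpr ⟨_, hs, by simp⟩)
          · cases s with
            | nil => simp at hh
            | cons x xs =>
                have h2 := hk _ hs
                intro h
                simp only [List.tail_cons] at h
                subst h
                simp at h2

-- ===== VERDICT =====
theorem contains_phi_py_spec : Claim_equal_contains_phi_py := by
  intro content _
  unfold Spec_contains_phi_py contains_phi_py contains_phi_py_alt
  rw [Bool.eq_iff_iff]
  rw [phiRun_iff phiKeywords (by decide) _ [] (by simp)]
  simp only [List.any_eq_true, PySem.Str.isIn_iff_infix, List.not_mem_nil,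
    false_and, exists_false, false_or, phiKeywords, List.mem_map]
  constructor
  · rintro ⟨s, hs, h⟩; exact ⟨s.toList, ⟨s, hs, rfl⟩, h⟩
  · rintro ⟨k, ⟨s, hs, rfl⟩, h⟩; exact ⟨s, hs, h⟩
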